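-- pv_equiv track=rewrite | github.com/CrhistianMRe/python-dsa | CH3/name_exist/main.py | does_name_exist
-- ===== SOURCE A (Python) =====
-- def does_name_exist(first_names, last_names, full_name):
--     result = False
--     for first in first_names:
--         for last in last_names:
--             possible = first + " " + last
--             if full_name == possible:
--                 result = True
--
--     return result
-- ===== SOURCE B (Python) =====
-- def does_name_exist(first_names, last_names, full_name):
--     firsts = set(first_names)
--     lasts = set(last_names)
--     for i in range(len(full_name)):
--         if full_name[i] == ' ' and full_name[:i] in firsts and full_name[i+1:] in lasts:
--             return True
--     return False
-- ===== Notes on version B (the rewrite author's own statement) =====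
-- stated objective: faster
-- what changed: Instead of forming every first+' '+last combination and comparing it to full_name, B scans full_name once for space positions and tests the prefix/suffix against hash sets of the names.
import Mathlib
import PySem

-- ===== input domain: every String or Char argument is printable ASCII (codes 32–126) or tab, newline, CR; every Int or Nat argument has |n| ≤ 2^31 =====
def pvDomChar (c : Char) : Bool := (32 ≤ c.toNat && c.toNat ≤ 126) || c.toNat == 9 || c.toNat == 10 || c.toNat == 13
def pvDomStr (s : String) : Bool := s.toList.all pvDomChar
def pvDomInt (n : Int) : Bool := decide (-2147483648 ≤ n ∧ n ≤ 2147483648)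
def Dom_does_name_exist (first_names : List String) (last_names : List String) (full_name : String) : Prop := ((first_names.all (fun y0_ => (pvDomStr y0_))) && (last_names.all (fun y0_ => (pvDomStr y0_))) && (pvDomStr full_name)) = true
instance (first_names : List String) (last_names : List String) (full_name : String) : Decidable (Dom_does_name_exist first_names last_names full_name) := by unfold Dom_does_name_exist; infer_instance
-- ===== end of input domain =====

-- B scans full_name for space positions and tests prefix/suffix against hash sets of the names,
-- instead of A's forming of every first+" "+last combination; return values agree on all inputs.

-- ===== PORT A =====
-- Python string concatenation/equality is ported on code-point lists (exact; Lean's own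
-- String.append is opaque to the kernel).
def does_name_exist (first_names : List String) (last_names : List String) (full_name : String) : Bool :=
  first_names.foldl (fun result first =>
    last_names.foldl (fun result last =>
      let possible := first.toList ++ [' '] ++ last.toList
      if full_name.toList == possible then true else result) result) false

-- ===== PORT B =====
def does_name_exist_alt (first_names : List String) (last_names : List String) (full_name : String) : Bool :=
  let firsts : PySem.Set String := PySem.Set.ofList first_names
  let lasts : PySem.Set String := PySem.Set.ofList last_names
  (PySem.List.pyRange 0 (PySem.Str.len full_name) 1).any fun i =>
    (PySem.Str.pyGet? full_name i == some ' ')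
    && firsts.contains (PySem.Str.slice full_name none (some i))
    && lasts.contains (PySem.Str.slice full_name (some (i + 1)) none)

-- ===== PRECONDITION & SPEC =====
def Spec_does_name_exist (first_names : List String) (last_names : List String) (full_name : String) (out : Bool) : Prop := out = does_name_exist_alt first_names last_names full_name
instance (first_names : List String) (last_names : List String) (full_name : String) (out : Bool) : Decidable (Spec_does_name_exist first_names last_names full_name out) := by unfold Spec_does_name_exist; infer_instance

-- ===== CLAIM (what is proved, stated in full; the proofs are below) =====
def Claim_equal_does_name_exist : Prop := ∀ (first_names : List String) (last_names : List String) (full_name : String), Dom_does_name_exist first_names last_names full_name → Spec_does_name_exist first_names last_names full_name (does_name_exist first_names last_names full_name)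

-- ===== LEMMAS AND PROOFS =====

-- A's inner loop 'if hit: result = True' is an 'or' with an any.
theorem foldl_if_true_eq_or_any {α : Type} (p : α → Bool) (l : List α) (r : Bool) :
    l.foldl (fun r x => if p x then true else r) r = (r || l.any p) := by
  induction l generalizing r with
  | nil => simp
  | cons x xs ih => cases hx : p x <;> rw [List.foldl_cons, ih] <;> simp [hx]

theorem foldl_or_eq_any {α : Type} (p : α → Bool) (l : List α) (r : Bool) :
    l.foldl (fun r x => r || p x) r = (r || l.any p) := by
  induction l generalizing r with
  | nil => simp
  | cons x xs ih => simp [List.foldl_cons, ih, Bool.or_assoc]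

-- A returns true iff some first/last pair concatenates to full_name.
theorem does_name_exist_eq_true_iff (fns lns : List String) (full : String) :
    does_name_exist fns lns full = true ↔
      ∃ f ∈ fns, ∃ l ∈ lns, full.toList = f.toList ++ ' ' :: l.toList := by
  unfold does_name_exist
  have h1 : ∀ (r : Bool),
      fns.foldl (fun result first =>
        lns.foldl (fun result last =>
          let possible := first.toList ++ [' '] ++ last.toList
          if full.toList == possible then true else result) result) r
      = (r || fns.any (fun f => lns.any (fun l =>
          full.toList == f.toList ++ [' '] ++ l.toList))) := by
    intro r
    have : ∀ (r : Bool) (f : String),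
        lns.foldl (fun result last =>
          let possible := f.toList ++ [' '] ++ last.toList
          if full.toList == possible then true else result) r
        = (r || lns.any (fun l => full.toList == f.toList ++ [' '] ++ l.toList)) := by
      intro r f
      exact foldl_if_true_eq_or_any (fun l => full.toList == f.toList ++ [' '] ++ l.toList) lns r
    calc _ = fns.foldl (fun r f => r || lns.any (fun l =>
              full.toList == f.toList ++ [' '] ++ l.toList)) r := by
            simp only [this]
      _ = _ := foldl_or_eq_any _ fns r
  rw [h1]
  simp [List.any_eq_true]

-- B returns true iff full_name splits at some space into a known first and last name.
theorem does_name_exist_alt_eq_true_iff (fns lns : List String) (full : String) :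
    does_name_exist_alt fns lns full = true ↔
      ∃ n : Nat, n < full.toList.length ∧ full.toList[n]? = some ' ' ∧
        (∃ f ∈ fns, f.toList = full.toList.take n) ∧
        (∃ l ∈ lns, l.toList = full.toList.drop (n + 1)) := by
  unfold does_name_exist_alt
  simp only [List.any_eq_true, PySem.List.mem_pyRange_one, PySem.Str.len_eq,
    Bool.and_eq_true, beq_iff_eq, PySem.Set.contains_iff, PySem.Set.mem_ofList]
  constructor
  · rintro ⟨i, ⟨hi0, hin⟩, ⟨hsp, hf⟩, hl⟩
    lift i to Nat using hi0
    refine ⟨i, by exact_mod_cast hin, ?_, ?_, ?_⟩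
    · simpa [PySem.Str.pyGet?_natCast] using hsp
    · refine ⟨_, hf, ?_⟩
      rw [PySem.Str.toList_slice]
      simp only [PySem.Chars.slice_eq_listSlice, PySem.List.slice_to_natCast]
    · refine ⟨_, hl, ?_⟩
      rw [PySem.Str.toList_slice,
        show ((i : Int) + 1) = ((i + 1 : Nat) : Int) by push_cast; ring]
      simp only [PySem.Chars.slice_eq_listSlice, PySem.List.slice_from_natCast]
  · rintro ⟨n, hn, hsp, ⟨f, hf, hft⟩, ⟨l, hl, hlt⟩⟩
    refine ⟨(n : Int), ⟨by positivity, by exact_mod_cast hn⟩, ⟨?_, ?_⟩, ?_⟩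
    · simpa [PySem.Str.pyGet?_natCast] using hsp
    · have : PySem.Str.slice full none (some (n : Int)) = f := by
        apply String.toList_inj.mp
        rw [PySem.Str.toList_slice]
        simp only [PySem.Chars.slice_eq_listSlice, PySem.List.slice_to_natCast]
        exact hft.symm
      rw [this]; exact hf
    · have : PySem.Str.slice full (some ((n : Int) + 1)) none = l := by
        apply String.toList_inj.mp
        rw [PySem.Str.toList_slice,
          show ((n : Int) + 1) = ((n + 1 : Nat) : Int) by push_cast; ring]
        simp only [PySem.Chars.slice_eq_listSlice, PySem.List.slice_from_natCast]
        exact hlt.symm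
      rw [this]; exact hl

-- The two characterisations describe the same splits.
theorem split_iff (fns lns : List String) (full : String) :
    (∃ f ∈ fns, ∃ l ∈ lns, full.toList = f.toList ++ ' ' :: l.toList) ↔
      ∃ n : Nat, n < full.toList.length ∧ full.toList[n]? = some ' ' ∧
        (∃ f ∈ fns, f.toList = full.toList.take n) ∧
        (∃ l ∈ lns, l.toList = full.toList.drop (n + 1)) := by
  constructor
  · rintro ⟨f, hf, l, hl, heq⟩
    refine ⟨f.toList.length, ?_, ?_, ⟨f, hf, ?_⟩, ⟨l, hl, ?_⟩⟩
    · rw [heq]; simp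
    · rw [heq]; simp
    · rw [heq]; simp
    · rw [heq]
      have h2 : f.toList ++ ' ' :: l.toList = (f.toList ++ [' ']) ++ l.toList := by simp
      have hlen : f.toList.length + 1 = (f.toList ++ [' ']).length := by simp
      rw [h2, hlen, List.drop_left]
  · rintro ⟨n, hn, hsp, ⟨f, hf, hft⟩, ⟨l, hl, hlt⟩⟩
    refine ⟨f, hf, l, hl, ?_⟩
    rw [hft, hlt]
    have hget : full.toList[n]'hn = ' ' := by
      have := List.getElem?_eq_getElem hn (l := full.toList)
      rw [hsp] at this
      exact (Option.some_inj.mp this.symm)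
    conv_lhs => rw [← List.take_append_drop n full.toList]
    rw [List.drop_eq_getElem_cons hn, hget]

-- ===== VERDICT (by name: the statement is the Claim_ definition above) =====
theorem does_name_exist_spec : Claim_equal_does_name_exist := by
  intro fns lns full _
  unfold Spec_does_name_exist
  rw [Bool.eq_iff_iff, does_name_exist_eq_true_iff, does_name_exist_alt_eq_true_iff]
  exact split_iff fns lns full
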